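-- pv_equiv track=rewrite | github.com/yaelGraz/Video-editor | services/audio_service.py | split_text_to_chunks
-- ===== SOURCE A (Python) =====
-- from typing import Optional, List, Dict, Tuple
--
-- def split_text_to_chunks(text: str, max_words: int = 5) -> List[str]:
--     """
--     Split text into chunks of maximum `max_words` words each.
--     Tries to split at natural breakpoints (punctuation) when possible.
--     """
--     if not text or not text.strip():
--         return []
--
--     words = text.strip().split()
--     if len(words) <= max_words:
--         return [text.strip()]
--
--     chunks = []
--     current_chunk = []
--
--     for word in words:
--         current_chunk.append(word)
--
--         # Check if we've reached max words or hit a natural break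
--         if len(current_chunk) >= max_words:
--             chunks.append(' '.join(current_chunk))
--             current_chunk = []
--         elif len(current_chunk) >= 3 and any(word.endswith(p) for p in ['.', '!', '?', ',', ':', ';']):
--             # Natural break at punctuation (if we have at least 3 words)
--             chunks.append(' '.join(current_chunk))
--             current_chunk = []
--
--     # Don't forget remaining words
--     if current_chunk:
--         chunks.append(' '.join(current_chunk))
--
--     return chunks
-- ===== SOURCE B (Python) =====
-- from typing import List
--
-- _PUNCT = '.!?,:;'
--
-- def _first_cut(words: List[str], max_words: int) -> int:
--     """Length of the first chunk: the smallest window length n with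
--     n >= max_words, or n >= 3 and the n-th word ending in punctuation."""
--     for j, w in enumerate(words):
--         n = j + 1
--         if n >= max_words or (n >= 3 and w[-1] in _PUNCT):
--             return n
--     return len(words)
--
-- def split_text_to_chunks(text: str, max_words: int = 5) -> List[str]:
--     if not text or not text.strip():
--         return []
--     words = text.strip().split()
--     if len(words) <= max_words:
--         return [text.strip()]
--     chunks = []
--     i = 0
--     while i < len(words):
--         c = i + _first_cut(words[i:], max_words)
--         chunks.append(' '.join(words[i:c]))
--         i = c
--     return chunks
-- ===== Notes on version B (the rewrite author's own statement) =====
-- stated objective: alternative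
-- what changed: A's accumulator loop (append each word, flush current_chunk on a cut) is replaced by windowing: a helper finds the length of the first chunk and the splitter emits that slice and recurses on the remaining words.
import Mathlib
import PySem

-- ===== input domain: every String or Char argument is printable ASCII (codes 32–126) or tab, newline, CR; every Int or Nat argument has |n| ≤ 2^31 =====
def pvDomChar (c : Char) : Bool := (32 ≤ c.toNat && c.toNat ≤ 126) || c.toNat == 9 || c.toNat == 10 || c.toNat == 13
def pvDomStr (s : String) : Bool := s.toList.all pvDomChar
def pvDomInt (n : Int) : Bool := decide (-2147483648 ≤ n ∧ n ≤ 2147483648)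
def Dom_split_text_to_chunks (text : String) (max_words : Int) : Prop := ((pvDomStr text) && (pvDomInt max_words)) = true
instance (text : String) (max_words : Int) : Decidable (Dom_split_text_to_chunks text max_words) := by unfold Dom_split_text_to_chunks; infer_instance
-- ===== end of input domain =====

-- B replaces A's accumulator loop by index-free windowing: a helper finds the length of the
-- first chunk and the splitter recurses on the rest (alternative decomposition, same cost).

-- ===== PORT A =====
-- the punctuation list ['.', '!', '?', ',', ':', ';'] of A
def pvPunctsA : List String := [".", "!", "?", ",", ":", ";"]

-- the body of A's 'for word in words' loop; state = (chunks, current_chunk)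
def pvStepA (max_words : Int) (st : List String × List String) (word : String) :
    List String × List String :=
  let cur := st.2 ++ [word]
  if max_words ≤ PySem.List.len cur then
    (st.1 ++ [PySem.Str.join " " cur], [])
  else if 3 ≤ PySem.List.len cur ∧ pvPunctsA.any (fun p => PySem.Str.endswith word p) then
    (st.1 ++ [PySem.Str.join " " cur], [])
  else
    (st.1, cur)

def split_text_to_chunks (text : String) (max_words : Int) : List String :=
  if text = "" ∨ PySem.Str.strip text = "" then []
  else
    let words := PySem.Str.split₀ (PySem.Str.strip text)
    if PySem.List.len words ≤ max_words then [PySem.Str.strip text]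
    else
      let st := words.foldl (pvStepA max_words) ([], [])
      if st.2 ≠ [] then st.1 ++ [PySem.Str.join " " st.2] else st.1

-- ===== PORT B =====
-- the characters of the string constant _PUNCT = '.!?,:;'
def pvPunctB : List Char := ['.', '!', '?', ',', ':', ';']

-- B's _first_cut: n is the enumerate counter j+1; 'w[-1] in _PUNCT' is a last-char test
def pvFirstCut (max_words : Int) : List String → Nat → Nat
  | [], n => n
  | w :: ws, n =>
    let n' := n + 1
    if max_words ≤ (n' : Int) ∨
        (3 ≤ n' ∧ ((PySem.Str.pyGet? w (-1)).any (fun c => pvPunctB.contains c))) then n'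
    else pvFirstCut max_words ws n'

-- the counter only grows (cited by pvChunksB's termination proof)
theorem pvFirstCut_ge (max_words : Int) : ∀ (ws : List String) (n : Nat), n ≤ pvFirstCut max_words ws n := by
  intro ws
  induction ws with
  | nil => intro n; simp [pvFirstCut]
  | cons w ws ih =>
    intro n
    simp only [pvFirstCut]
    split
    · omega
    · exact le_trans (by omega) (ih (n + 1))

theorem pvFirstCut_pos (max_words : Int) (w : String) (ws : List String) :
    1 ≤ pvFirstCut max_words (w :: ws) 0 := by
  simp only [pvFirstCut]
  split
  · omega
  · exact le_trans (by omega) (pvFirstCut_ge max_words ws 1)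

-- B's while loop: emit the first chunk, recurse on the remaining words
def pvChunksB (max_words : Int) (ws : List String) : List String :=
  match ws with
  | [] => []
  | w :: ws' =>
    let c := pvFirstCut max_words (w :: ws') 0
    PySem.Str.join " " (List.take c (w :: ws')) :: pvChunksB max_words (List.drop c (w :: ws'))
termination_by ws.length
decreasing_by
  simp only [List.length_drop, List.length_cons]
  have h1 := pvFirstCut_pos max_words w ws'
  omega

def split_text_to_chunks_alt (text : String) (max_words : Int) : List String :=
  if text = "" ∨ PySem.Str.strip text = "" then []
  else
    let words := PySem.Str.split₀ (PySem.Str.strip text)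
    if PySem.List.len words ≤ max_words then [PySem.Str.strip text]
    else
      pvChunksB max_words words

-- ===== PRECONDITION & SPEC =====
def Spec_split_text_to_chunks (text : String) (max_words : Int) (out : List String) : Prop := out = split_text_to_chunks_alt text max_words
instance (text : String) (max_words : Int) (out : List String) : Decidable (Spec_split_text_to_chunks text max_words out) := by unfold Spec_split_text_to_chunks; infer_instance

-- ===== CLAIM (what is proved, stated in full; the proofs are below) =====
def Claim_equal_split_text_to_chunks : Prop := ∀ (text : String) (max_words : Int), Dom_split_text_to_chunks text max_words → Spec_split_text_to_chunks text max_words (split_text_to_chunks text max_words)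

-- ===== LEMMAS AND PROOFS =====

-- A's loop, written as a recursion on the word list (proof-side mirror of the fold)
def pvAux (max_words : Int) : List String → List String → List String
  | cur, [] => if cur = [] then [] else [PySem.Str.join " " cur]
  | cur, w :: ws =>
    let cur' := cur ++ [w]
    if max_words ≤ PySem.List.len cur' then
      PySem.Str.join " " cur' :: pvAux max_words [] ws
    else if 3 ≤ PySem.List.len cur' ∧ pvPunctsA.any (fun p => PySem.Str.endswith w p) then
      PySem.Str.join " " cur' :: pvAux max_words [] ws
    else
      pvAux max_words cur' ws

-- A's flushed fold equals the recursion pvAux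
theorem pvFold_eq_aux (max_words : Int) : ∀ (ws chunks cur : List String),
    (if (List.foldl (pvStepA max_words) (chunks, cur) ws).2 ≠ [] then
       (List.foldl (pvStepA max_words) (chunks, cur) ws).1
         ++ [PySem.Str.join " " (List.foldl (pvStepA max_words) (chunks, cur) ws).2]
     else (List.foldl (pvStepA max_words) (chunks, cur) ws).1)
    = chunks ++ pvAux max_words cur ws := by
  intro ws
  induction ws with
  | nil =>
    intro chunks cur
    by_cases h : cur = [] <;> simp [pvAux, h]
  | cons w ws ih =>
    intro chunks cur
    rw [List.foldl_cons]
    have hstep : pvStepA max_words (chunks, cur) w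
        = (if max_words ≤ PySem.List.len (cur ++ [w]) then
             (chunks ++ [PySem.Str.join " " (cur ++ [w])], [])
           else if 3 ≤ PySem.List.len (cur ++ [w]) ∧ pvPunctsA.any (fun p => PySem.Str.endswith w p) then
             (chunks ++ [PySem.Str.join " " (cur ++ [w])], [])
           else (chunks, cur ++ [w])) := rfl
    have haux : pvAux max_words cur (w :: ws)
        = (if max_words ≤ PySem.List.len (cur ++ [w]) then
             PySem.Str.join " " (cur ++ [w]) :: pvAux max_words [] ws
           else if 3 ≤ PySem.List.len (cur ++ [w]) ∧ pvPunctsA.any (fun p => PySem.Str.endswith w p) then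
             PySem.Str.join " " (cur ++ [w]) :: pvAux max_words [] ws
           else pvAux max_words (cur ++ [w]) ws) := rfl
    rw [hstep, haux]
    by_cases h1 : max_words ≤ PySem.List.len (cur ++ [w])
    · rw [if_pos h1, if_pos h1, ih]
      simp
    · rw [if_neg h1, if_neg h1]
      by_cases h2 : 3 ≤ PySem.List.len (cur ++ [w]) ∧ pvPunctsA.any (fun p => PySem.Str.endswith w p)
      · rw [if_pos h2, if_pos h2, ih]
        simp
      · rw [if_neg h2, if_neg h2, ih]

-- endswith by a single character is a last-character test
theorem pvEndswith_single (cs : List Char) (c : Char) :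
    PySem.Chars.endswith cs [c] = (cs.getLast? == some c) := by
  rw [Bool.eq_iff_iff, PySem.Chars.endswith_iff, beq_iff_eq, List.getLast?_eq_some_iff]
  constructor
  · rintro ⟨t, ht⟩; exact ⟨t, ht.symm⟩
  · rintro ⟨t, rfl⟩; exact ⟨t, rfl⟩

-- A's 'any(word.endswith(p) …)' agrees with B's 'word[-1] in _PUNCT'
theorem pvBreak_eq (w : String) :
    ((PySem.Str.pyGet? w (-1)).any (fun c => pvPunctB.contains c))
    = pvPunctsA.any (fun p => PySem.Str.endswith w p) := by
  have hg : PySem.Str.pyGet? w (-1) = w.toList.getLast? := by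
    rw [PySem.Str.pyGet?_eq, PySem.Chars.pyGet?_eq_listPyGet?, PySem.List.pyGet?_neg_one]
  have he : ∀ (p : String) (c : Char), p.toList = [c] →
      PySem.Str.endswith w p = (w.toList.getLast? == some c) := by
    intro p c hp
    rw [PySem.Str.endswith_eq, hp]
    exact pvEndswith_single _ _
  rw [hg]
  simp only [pvPunctsA, List.any_cons, List.any_nil,
    he "." '.' rfl, he "!" '!' rfl, he "?" '?' rfl,
    he "," ',' rfl, he ":" ':' rfl, he ";" ';' rfl]
  cases h : w.toList.getLast? with
  | none => simp
  | some a =>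
    rw [Bool.eq_iff_iff]
    simp [pvPunctB]

-- pvAux, unfolded to the first chunk found by pvFirstCut
theorem pvAux_cut (max_words : Int) : ∀ (ws cur : List String),
    pvAux max_words cur ws =
      match ws with
      | [] => if cur = [] then [] else [PySem.Str.join " " cur]
      | _ :: _ =>
        let c := pvFirstCut max_words ws cur.length - cur.length
        PySem.Str.join " " (cur ++ List.take c ws) :: pvAux max_words [] (List.drop c ws) := by
  intro ws
  induction ws with
  | nil => intro cur; rfl
  | cons w ws ih =>
    intro cur
    have hlen : PySem.List.len (cur ++ [w]) = (cur.length : Int) + 1 := by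
      simp [PySem.List.len_eq]
    have hB := pvBreak_eq w
    by_cases hf : max_words ≤ (cur.length : Int) + 1
        ∨ (3 ≤ cur.length + 1 ∧ pvPunctsA.any (fun p => PySem.Str.endswith w p) = true)
    · -- the cut fires on this word, in both programs
      have hcut : pvFirstCut max_words (w :: ws) cur.length = cur.length + 1 := by
        simp only [pvFirstCut]
        rw [if_pos]
        rcases hf with hf | hf
        · left; push_cast; omega
        · right; exact ⟨by omega, by rw [hB]; exact hf.2⟩
      have hA : pvAux max_words cur (w :: ws)
          = PySem.Str.join " " (cur ++ [w]) :: pvAux max_words [] ws := by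
        simp only [pvAux]
        rcases hf with hf | hf
        · rw [if_pos]; rw [hlen]; exact hf
        · by_cases h1 : max_words ≤ PySem.List.len (cur ++ [w])
          · rw [if_pos h1]
          · rw [if_neg h1, if_pos]
            exact ⟨by rw [hlen]; omega, hf.2⟩
      rw [hA]
      simp only [hcut, Nat.add_sub_cancel_left]
      simp
    · -- no cut here: the word joins the current chunk in both programs
      obtain ⟨hf1, hf2⟩ := not_or.mp hf
      have hA : pvAux max_words cur (w :: ws) = pvAux max_words (cur ++ [w]) ws := by
        simp only [pvAux]
        rw [if_neg, if_neg]
        · rintro ⟨h3, hp⟩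
          exact hf2 ⟨by rw [hlen] at h3; omega, hp⟩
        · rw [hlen]; exact hf1
      have hcut : pvFirstCut max_words (w :: ws) cur.length
          = pvFirstCut max_words ws (cur.length + 1) := by
        simp only [pvFirstCut]
        rw [if_neg]
        rintro (h | ⟨h3, hp⟩)
        · apply hf1; omega
        · exact hf2 ⟨by omega, by rw [← hB]; exact hp⟩
      rw [hA, ih]
      cases ws with
      | nil =>
        have h0 : pvFirstCut max_words ([] : List String) (cur.length + 1) = cur.length + 1 := rfl
        simp only [hcut, h0, Nat.add_sub_cancel_left]
        have hne : cur ++ [w] ≠ [] := by simp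
        simp [pvAux, hne]
      | cons w2 ws2 =>
        have hge := pvFirstCut_ge max_words (w2 :: ws2) (cur.length + 1)
        have hlen2 : (cur ++ [w]).length = cur.length + 1 := by simp
        simp only [hcut, hlen2]
        have hc : pvFirstCut max_words (w2 :: ws2) (cur.length + 1) - cur.length
            = (pvFirstCut max_words (w2 :: ws2) (cur.length + 1) - (cur.length + 1)) + 1 := by
          omega
        rw [hc]
        simp [List.take_succ_cons, List.drop_succ_cons]

theorem pvAux_eq_chunksB (max_words : Int) : ∀ (n : Nat) (ws : List String), ws.length ≤ n →
    pvAux max_words [] ws = pvChunksB max_words ws := by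
  intro n
  induction n with
  | zero =>
    intro ws h
    have hnil : ws = [] := List.eq_nil_of_length_eq_zero (Nat.le_zero.mp h)
    subst hnil
    rw [pvChunksB]
    rfl
  | succ n ih =>
    intro ws h
    cases ws with
    | nil => rw [pvChunksB]; rfl
    | cons w ws' =>
      rw [pvAux_cut, pvChunksB]
      simp only [List.length_nil, Nat.sub_zero, List.nil_append]
      congr 1
      apply ih
      have h1 := pvFirstCut_pos max_words w ws'
      simp only [List.length_drop, List.length_cons]
      simp only [List.length_cons] at h
      omega

-- ===== VERDICT (by name: the statement is the Claim_ definition above) =====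
theorem split_text_to_chunks_spec : Claim_equal_split_text_to_chunks := by
  intro text max_words _
  unfold Spec_split_text_to_chunks split_text_to_chunks split_text_to_chunks_alt
  split
  · rfl
  · dsimp only
    by_cases hlen : PySem.List.len (PySem.Str.split₀ (PySem.Str.strip text)) ≤ max_words
    · rw [if_pos hlen, if_pos hlen]
    · rw [if_neg hlen, if_neg hlen, pvFold_eq_aux]
      simp only [List.nil_append]
      exact pvAux_eq_chunksB max_words _ _ le_rfl
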